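-- pv_equiv track=rewrite | github.com/LangkunLong/AI-Visa-Screener | visa_screener.py | bert_entities_to_criteria
-- ===== SOURCE A (Python) =====
-- def bert_entities_to_criteria(entities: list) -> dict:
--
--     criteria = {
--         "awards": [],
--         "membership": [],
--         "press": [],
--         "judging": [],
--         "original contribution": [],
--         "scholarly articles": [],
--         "critical employment": [],
--         "high remuneration": []
--     }
--
--     for entity in entities:
--         label = entity.get("entity", "")
--         entity_text = entity.get("word", "")
--         lower_text = entity_text.lower()
--
--         # potential award mentions
--         award_keywords = ["award", "prize", "honor", "medal", "fellowship"]
--         if label.endswith("MISC") or any(k in lower_text for k in award_keywords):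
--             criteria["awards"].append(entity_text)
--
--         # if the entity is ORG include common membership indicators
--         org_keywords = ["ORG", "association", "society", "member"]
--         if label.endswith("ORG") and any(k in lower_text for k in org_keywords):
--             criteria["membership"].append(entity_text)
--
--         # MISC with known media names or keywords
--         press_keywords = ["press", "media", "interview", "coverage"]
--         if any(k in lower_text for k in press_keywords):
--             criteria["press"].append(entity_text)
--
--         # Judging: look for judge, panel, reviewer, adjudicator, evaluator
--         judging_keywords = ["judge", "panel", "reviewer", "adjudicator", "evaluator"]
--         if any(k in lower_text for k in judging_keywords):
--             criteria["judging"].append(entity_text)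
--
--         # Original contribution: contribution, innovation, developed, invention, breakthrough, discovery
--         contribution_keywords = [
--             "contribution", "innovation", "developed", "invention", "breakthrough", "discovery"
--         ]
--         if any(k in lower_text for k in contribution_keywords):
--             criteria["original contribution"].append(entity_text)
--
--         # Scholarly articles: article, journal, publication, paper, manuscript, proceedings
--         scholarly_keywords = [
--             "article", "journal", "publication", "paper", "manuscript", "proceedings"
--         ]
--         if any(k in lower_text for k in scholarly_keywords):
--             criteria["scholarly articles"].append(entity_text)
--
--         # Critical employment: look for orgs with high-level roles or company suffixes
--         critical_roles = [
--             "executive", "director", "chief", "president", "founder", "ceo", "cto", "cfo", "lead"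
--         ]
--         company_suffixes = ["inc", "llc", "corporation", "corp", "ltd", "company", "plc"]
--         if label.endswith("ORG") and (
--             any(role in lower_text for role in critical_roles) or
--             any(suffix in lower_text for suffix in company_suffixes)
--         ):
--             criteria["critical employment"].append(entity_text)
--
--         # High remuneration: salary, compensation, remuneration, income, earnings, wage, stipend, pay
--         remuneration_keywords = [
--             "salary", "compensation", "remuneration", "income", "earnings", "wage", "stipend", "pay"
--         ]
--         if any(k in lower_text for k in remuneration_keywords):
--             criteria["high remuneration"].append(entity_text)
--
--     return criteria
-- ===== SOURCE B (Python) =====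
-- def bert_entities_to_criteria(entities: list) -> dict:
--     # Per-bucket rule table: each bucket gets its own pass over the entities.
--     rules = [
--         ("awards", lambda label, t: label.endswith("MISC") or any(
--             k in t for k in ["award", "prize", "honor", "medal", "fellowship"])),
--         ("membership", lambda label, t: label.endswith("ORG") and any(
--             k in t for k in ["ORG", "association", "society", "member"])),
--         ("press", lambda label, t: any(
--             k in t for k in ["press", "media", "interview", "coverage"])),
--         ("judging", lambda label, t: any(
--             k in t for k in ["judge", "panel", "reviewer", "adjudicator", "evaluator"])),
--         ("original contribution", lambda label, t: any(
--             k in t for k in ["contribution", "innovation", "developed", "invention",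
--                              "breakthrough", "discovery"])),
--         ("scholarly articles", lambda label, t: any(
--             k in t for k in ["article", "journal", "publication", "paper",
--                              "manuscript", "proceedings"])),
--         ("critical employment", lambda label, t: label.endswith("ORG") and (
--             any(r in t for r in ["executive", "director", "chief", "president",
--                                  "founder", "ceo", "cto", "cfo", "lead"]) or
--             any(s in t for s in ["inc", "llc", "corporation", "corp", "ltd",
--                                  "company", "plc"]))),
--         ("high remuneration", lambda label, t: any(
--             k in t for k in ["salary", "compensation", "remuneration", "income",
--                              "earnings", "wage", "stipend", "pay"])),
--     ]
--     return {
--         name: [e.get("word", "") for e in entities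
--                if pred(e.get("entity", ""), e.get("word", "").lower())]
--         for name, pred in rules
--     }
-- ===== Notes on version B (the rewrite author's own statement) =====
-- stated objective: idiomatic
-- what changed: Replaces the single imperative pass that mutates eight pre-built dict lists through eight inline if-blocks with a declarative (bucket, predicate) rule table and one dict comprehension that builds each bucket as its own filtered pass over the entities.
import Mathlib
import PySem

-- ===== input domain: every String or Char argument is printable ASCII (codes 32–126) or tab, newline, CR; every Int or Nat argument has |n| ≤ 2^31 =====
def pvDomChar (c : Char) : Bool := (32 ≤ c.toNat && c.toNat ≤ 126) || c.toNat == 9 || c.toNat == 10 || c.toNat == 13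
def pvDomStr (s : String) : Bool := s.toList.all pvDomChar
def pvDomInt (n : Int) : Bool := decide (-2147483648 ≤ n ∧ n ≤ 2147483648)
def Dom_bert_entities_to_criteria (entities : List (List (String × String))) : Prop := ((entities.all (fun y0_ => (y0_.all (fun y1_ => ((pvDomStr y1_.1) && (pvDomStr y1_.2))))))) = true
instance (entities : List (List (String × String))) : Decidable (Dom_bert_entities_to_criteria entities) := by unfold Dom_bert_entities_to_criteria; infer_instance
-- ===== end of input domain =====

-- B replaces A's single mutate-eight-lists pass with a (bucket, predicate) rule table,
-- building each bucket by its own filtered pass; objective: idiomatic/declarative, same cost.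

-- shared: e.get(k, "") on a Python dict (association list, first match), and the keyword lists
def pvGet (e : List (String × String)) (k : String) : String := (e.lookup k).getD ""
def awardKeywords : List String := ["award", "prize", "honor", "medal", "fellowship"]
def orgKeywords : List String := ["ORG", "association", "society", "member"]
def pressKeywords : List String := ["press", "media", "interview", "coverage"]
def judgingKeywords : List String := ["judge", "panel", "reviewer", "adjudicator", "evaluator"]
def contributionKeywords : List String := ["contribution", "innovation", "developed", "invention", "breakthrough", "discovery"]
def scholarlyKeywords : List String := ["article", "journal", "publication", "paper", "manuscript", "proceedings"]
def criticalRoles : List String := ["executive", "director", "chief", "president", "founder", "ceo", "cto", "cfo", "lead"]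
def companySuffixes : List String := ["inc", "llc", "corporation", "corp", "ltd", "company", "plc"]
def remunerationKeywords : List String := ["salary", "compensation", "remuneration", "income", "earnings", "wage", "stipend", "pay"]
def anyKw (ks : List String) (t : String) : Bool := ks.any (fun k => PySem.Str.isIn k t)

-- ===== PORT A =====
-- the eight-list criteria dict (fixed keys)
structure Crit where
  awards : List String
  membership : List String
  press : List String
  judging : List String
  contribution : List String
  scholarly : List String
  critical : List String
  remuneration : List String
deriving Repr, DecidableEq

-- one helper per if-block of A's loop body, applied in A's order
def critBlock1 (c : Crit) (label entity_text lower_text : String) : Crit :=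
  if PySem.Str.endswith label "MISC" || anyKw awardKeywords lower_text then
    { c with awards := c.awards ++ [entity_text] } else c
def critBlock2 (c : Crit) (label entity_text lower_text : String) : Crit :=
  if PySem.Str.endswith label "ORG" && anyKw orgKeywords lower_text then
    { c with membership := c.membership ++ [entity_text] } else c
def critBlock3 (c : Crit) (_label entity_text lower_text : String) : Crit :=
  if anyKw pressKeywords lower_text then
    { c with press := c.press ++ [entity_text] } else c
def critBlock4 (c : Crit) (_label entity_text lower_text : String) : Crit :=
  if anyKw judgingKeywords lower_text then
    { c with judging := c.judging ++ [entity_text] } else c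
def critBlock5 (c : Crit) (_label entity_text lower_text : String) : Crit :=
  if anyKw contributionKeywords lower_text then
    { c with contribution := c.contribution ++ [entity_text] } else c
def critBlock6 (c : Crit) (_label entity_text lower_text : String) : Crit :=
  if anyKw scholarlyKeywords lower_text then
    { c with scholarly := c.scholarly ++ [entity_text] } else c
def critBlock7 (c : Crit) (label entity_text lower_text : String) : Crit :=
  if PySem.Str.endswith label "ORG" && (anyKw criticalRoles lower_text || anyKw companySuffixes lower_text) then
    { c with critical := c.critical ++ [entity_text] } else c
def critBlock8 (c : Crit) (_label entity_text lower_text : String) : Crit :=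
  if anyKw remunerationKeywords lower_text then
    { c with remuneration := c.remuneration ++ [entity_text] } else c

-- one iteration of A's for-loop: the eight if-blocks, in order
def critStep (c : Crit) (entity : List (String × String)) : Crit :=
  let label := pvGet entity "entity"
  let entity_text := pvGet entity "word"
  let lower_text := PySem.Str.lower entity_text
  let c := critBlock1 c label entity_text lower_text
  let c := critBlock2 c label entity_text lower_text
  let c := critBlock3 c label entity_text lower_text
  let c := critBlock4 c label entity_text lower_text
  let c := critBlock5 c label entity_text lower_text
  let c := critBlock6 c label entity_text lower_text
  let c := critBlock7 c label entity_text lower_text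
  let c := critBlock8 c label entity_text lower_text
  c

def bert_entities_to_criteria (entities : List (List (String × String))) : List (String × List String) :=
  let c := entities.foldl critStep ⟨[], [], [], [], [], [], [], []⟩
  [("awards", c.awards), ("membership", c.membership), ("press", c.press), ("judging", c.judging),
   ("original contribution", c.contribution), ("scholarly articles", c.scholarly),
   ("critical employment", c.critical), ("high remuneration", c.remuneration)]

-- ===== PORT B =====
-- the rule table: (bucket name, predicate on (label, lower_text))
def critRules : List (String × (String → String → Bool)) :=
  [("awards", fun label t => PySem.Str.endswith label "MISC" || anyKw awardKeywords t),
   ("membership", fun label t => PySem.Str.endswith label "ORG" && anyKw orgKeywords t),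
   ("press", fun _ t => anyKw pressKeywords t),
   ("judging", fun _ t => anyKw judgingKeywords t),
   ("original contribution", fun _ t => anyKw contributionKeywords t),
   ("scholarly articles", fun _ t => anyKw scholarlyKeywords t),
   ("critical employment", fun label t => PySem.Str.endswith label "ORG" && (anyKw criticalRoles t || anyKw companySuffixes t)),
   ("high remuneration", fun _ t => anyKw remunerationKeywords t)]

def bert_entities_to_criteria_alt (entities : List (List (String × String))) : List (String × List String) :=
  critRules.map (fun r =>
    (r.1, (entities.filter (fun e => r.2 (pvGet e "entity") (PySem.Str.lower (pvGet e "word")))).map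
            (fun e => pvGet e "word")))

-- ===== PRECONDITION & SPEC =====
def Spec_bert_entities_to_criteria (entities : List (List (String × String))) (out : List (String × List String)) : Prop := out = bert_entities_to_criteria_alt entities
instance (entities : List (List (String × String))) (out : List (String × List String)) : Decidable (Spec_bert_entities_to_criteria entities out) := by unfold Spec_bert_entities_to_criteria; infer_instance

-- ===== CLAIM (what is proved, stated in full; the proofs are below) =====
def Claim_equal_bert_entities_to_criteria : Prop := ∀ (entities : List (List (String × String))), Dom_bert_entities_to_criteria entities → Spec_bert_entities_to_criteria entities (bert_entities_to_criteria entities)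

-- ===== LEMMAS AND PROOFS =====

-- field projections of the eight blocks (block i touches only field i)
@[simp] theorem critBlock1_awards (c : Crit) (label entity_text lower_text : String) :
    (critBlock1 c label entity_text lower_text).awards = if PySem.Str.endswith label "MISC" || anyKw awardKeywords lower_text then c.awards ++ [entity_text] else c.awards := by
  simp [critBlock1, apply_ite Crit.awards]
@[simp] theorem critBlock1_membership (c : Crit) (label entity_text lower_text : String) :
    (critBlock1 c label entity_text lower_text).membership = c.membership := by
  simp [critBlock1, apply_ite Crit.membership]
@[simp] theorem critBlock1_press (c : Crit) (label entity_text lower_text : String) :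
    (critBlock1 c label entity_text lower_text).press = c.press := by
  simp [critBlock1, apply_ite Crit.press]
@[simp] theorem critBlock1_judging (c : Crit) (label entity_text lower_text : String) :
    (critBlock1 c label entity_text lower_text).judging = c.judging := by
  simp [critBlock1, apply_ite Crit.judging]
@[simp] theorem critBlock1_contribution (c : Crit) (label entity_text lower_text : String) :
    (critBlock1 c label entity_text lower_text).contribution = c.contribution := by
  simp [critBlock1, apply_ite Crit.contribution]
@[simp] theorem critBlock1_scholarly (c : Crit) (label entity_text lower_text : String) :
    (critBlock1 c label entity_text lower_text).scholarly = c.scholarly := by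
  simp [critBlock1, apply_ite Crit.scholarly]
@[simp] theorem critBlock1_critical (c : Crit) (label entity_text lower_text : String) :
    (critBlock1 c label entity_text lower_text).critical = c.critical := by
  simp [critBlock1, apply_ite Crit.critical]
@[simp] theorem critBlock1_remuneration (c : Crit) (label entity_text lower_text : String) :
    (critBlock1 c label entity_text lower_text).remuneration = c.remuneration := by
  simp [critBlock1, apply_ite Crit.remuneration]
@[simp] theorem critBlock2_awards (c : Crit) (label entity_text lower_text : String) :
    (critBlock2 c label entity_text lower_text).awards = c.awards := by
  simp [critBlock2, apply_ite Crit.awards]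
@[simp] theorem critBlock2_membership (c : Crit) (label entity_text lower_text : String) :
    (critBlock2 c label entity_text lower_text).membership = if PySem.Str.endswith label "ORG" && anyKw orgKeywords lower_text then c.membership ++ [entity_text] else c.membership := by
  simp [critBlock2, apply_ite Crit.membership]
@[simp] theorem critBlock2_press (c : Crit) (label entity_text lower_text : String) :
    (critBlock2 c label entity_text lower_text).press = c.press := by
  simp [critBlock2, apply_ite Crit.press]
@[simp] theorem critBlock2_judging (c : Crit) (label entity_text lower_text : String) :
    (critBlock2 c label entity_text lower_text).judging = c.judging := by
  simp [critBlock2, apply_ite Crit.judging]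
@[simp] theorem critBlock2_contribution (c : Crit) (label entity_text lower_text : String) :
    (critBlock2 c label entity_text lower_text).contribution = c.contribution := by
  simp [critBlock2, apply_ite Crit.contribution]
@[simp] theorem critBlock2_scholarly (c : Crit) (label entity_text lower_text : String) :
    (critBlock2 c label entity_text lower_text).scholarly = c.scholarly := by
  simp [critBlock2, apply_ite Crit.scholarly]
@[simp] theorem critBlock2_critical (c : Crit) (label entity_text lower_text : String) :
    (critBlock2 c label entity_text lower_text).critical = c.critical := by
  simp [critBlock2, apply_ite Crit.critical]
@[simp] theorem critBlock2_remuneration (c : Crit) (label entity_text lower_text : String) :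
    (critBlock2 c label entity_text lower_text).remuneration = c.remuneration := by
  simp [critBlock2, apply_ite Crit.remuneration]
@[simp] theorem critBlock3_awards (c : Crit) (label entity_text lower_text : String) :
    (critBlock3 c label entity_text lower_text).awards = c.awards := by
  simp [critBlock3, apply_ite Crit.awards]
@[simp] theorem critBlock3_membership (c : Crit) (label entity_text lower_text : String) :
    (critBlock3 c label entity_text lower_text).membership = c.membership := by
  simp [critBlock3, apply_ite Crit.membership]
@[simp] theorem critBlock3_press (c : Crit) (label entity_text lower_text : String) :
    (critBlock3 c label entity_text lower_text).press = if anyKw pressKeywords lower_text then c.press ++ [entity_text] else c.press := by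
  simp [critBlock3, apply_ite Crit.press]
@[simp] theorem critBlock3_judging (c : Crit) (label entity_text lower_text : String) :
    (critBlock3 c label entity_text lower_text).judging = c.judging := by
  simp [critBlock3, apply_ite Crit.judging]
@[simp] theorem critBlock3_contribution (c : Crit) (label entity_text lower_text : String) :
    (critBlock3 c label entity_text lower_text).contribution = c.contribution := by
  simp [critBlock3, apply_ite Crit.contribution]
@[simp] theorem critBlock3_scholarly (c : Crit) (label entity_text lower_text : String) :
    (critBlock3 c label entity_text lower_text).scholarly = c.scholarly := by
  simp [critBlock3, apply_ite Crit.scholarly]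
@[simp] theorem critBlock3_critical (c : Crit) (label entity_text lower_text : String) :
    (critBlock3 c label entity_text lower_text).critical = c.critical := by
  simp [critBlock3, apply_ite Crit.critical]
@[simp] theorem critBlock3_remuneration (c : Crit) (label entity_text lower_text : String) :
    (critBlock3 c label entity_text lower_text).remuneration = c.remuneration := by
  simp [critBlock3, apply_ite Crit.remuneration]
@[simp] theorem critBlock4_awards (c : Crit) (label entity_text lower_text : String) :
    (critBlock4 c label entity_text lower_text).awards = c.awards := by
  simp [critBlock4, apply_ite Crit.awards]
@[simp] theorem critBlock4_membership (c : Crit) (label entity_text lower_text : String) :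
    (critBlock4 c label entity_text lower_text).membership = c.membership := by
  simp [critBlock4, apply_ite Crit.membership]
@[simp] theorem critBlock4_press (c : Crit) (label entity_text lower_text : String) :
    (critBlock4 c label entity_text lower_text).press = c.press := by
  simp [critBlock4, apply_ite Crit.press]
@[simp] theorem critBlock4_judging (c : Crit) (label entity_text lower_text : String) :
    (critBlock4 c label entity_text lower_text).judging = if anyKw judgingKeywords lower_text then c.judging ++ [entity_text] else c.judging := by
  simp [critBlock4, apply_ite Crit.judging]
@[simp] theorem critBlock4_contribution (c : Crit) (label entity_text lower_text : String) :
    (critBlock4 c label entity_text lower_text).contribution = c.contribution := by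
  simp [critBlock4, apply_ite Crit.contribution]
@[simp] theorem critBlock4_scholarly (c : Crit) (label entity_text lower_text : String) :
    (critBlock4 c label entity_text lower_text).scholarly = c.scholarly := by
  simp [critBlock4, apply_ite Crit.scholarly]
@[simp] theorem critBlock4_critical (c : Crit) (label entity_text lower_text : String) :
    (critBlock4 c label entity_text lower_text).critical = c.critical := by
  simp [critBlock4, apply_ite Crit.critical]
@[simp] theorem critBlock4_remuneration (c : Crit) (label entity_text lower_text : String) :
    (critBlock4 c label entity_text lower_text).remuneration = c.remuneration := by
  simp [critBlock4, apply_ite Crit.remuneration]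
@[simp] theorem critBlock5_awards (c : Crit) (label entity_text lower_text : String) :
    (critBlock5 c label entity_text lower_text).awards = c.awards := by
  simp [critBlock5, apply_ite Crit.awards]
@[simp] theorem critBlock5_membership (c : Crit) (label entity_text lower_text : String) :
    (critBlock5 c label entity_text lower_text).membership = c.membership := by
  simp [critBlock5, apply_ite Crit.membership]
@[simp] theorem critBlock5_press (c : Crit) (label entity_text lower_text : String) :
    (critBlock5 c label entity_text lower_text).press = c.press := by
  simp [critBlock5, apply_ite Crit.press]
@[simp] theorem critBlock5_judging (c : Crit) (label entity_text lower_text : String) :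
    (critBlock5 c label entity_text lower_text).judging = c.judging := by
  simp [critBlock5, apply_ite Crit.judging]
@[simp] theorem critBlock5_contribution (c : Crit) (label entity_text lower_text : String) :
    (critBlock5 c label entity_text lower_text).contribution = if anyKw contributionKeywords lower_text then c.contribution ++ [entity_text] else c.contribution := by
  simp [critBlock5, apply_ite Crit.contribution]
@[simp] theorem critBlock5_scholarly (c : Crit) (label entity_text lower_text : String) :
    (critBlock5 c label entity_text lower_text).scholarly = c.scholarly := by
  simp [critBlock5, apply_ite Crit.scholarly]
@[simp] theorem critBlock5_critical (c : Crit) (label entity_text lower_text : String) :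
    (critBlock5 c label entity_text lower_text).critical = c.critical := by
  simp [critBlock5, apply_ite Crit.critical]
@[simp] theorem critBlock5_remuneration (c : Crit) (label entity_text lower_text : String) :
    (critBlock5 c label entity_text lower_text).remuneration = c.remuneration := by
  simp [critBlock5, apply_ite Crit.remuneration]
@[simp] theorem critBlock6_awards (c : Crit) (label entity_text lower_text : String) :
    (critBlock6 c label entity_text lower_text).awards = c.awards := by
  simp [critBlock6, apply_ite Crit.awards]
@[simp] theorem critBlock6_membership (c : Crit) (label entity_text lower_text : String) :
    (critBlock6 c label entity_text lower_text).membership = c.membership := by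
  simp [critBlock6, apply_ite Crit.membership]
@[simp] theorem critBlock6_press (c : Crit) (label entity_text lower_text : String) :
    (critBlock6 c label entity_text lower_text).press = c.press := by
  simp [critBlock6, apply_ite Crit.press]
@[simp] theorem critBlock6_judging (c : Crit) (label entity_text lower_text : String) :
    (critBlock6 c label entity_text lower_text).judging = c.judging := by
  simp [critBlock6, apply_ite Crit.judging]
@[simp] theorem critBlock6_contribution (c : Crit) (label entity_text lower_text : String) :
    (critBlock6 c label entity_text lower_text).contribution = c.contribution := by
  simp [critBlock6, apply_ite Crit.contribution]
@[simp] theorem critBlock6_scholarly (c : Crit) (label entity_text lower_text : String) :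
    (critBlock6 c label entity_text lower_text).scholarly = if anyKw scholarlyKeywords lower_text then c.scholarly ++ [entity_text] else c.scholarly := by
  simp [critBlock6, apply_ite Crit.scholarly]
@[simp] theorem critBlock6_critical (c : Crit) (label entity_text lower_text : String) :
    (critBlock6 c label entity_text lower_text).critical = c.critical := by
  simp [critBlock6, apply_ite Crit.critical]
@[simp] theorem critBlock6_remuneration (c : Crit) (label entity_text lower_text : String) :
    (critBlock6 c label entity_text lower_text).remuneration = c.remuneration := by
  simp [critBlock6, apply_ite Crit.remuneration]
@[simp] theorem critBlock7_awards (c : Crit) (label entity_text lower_text : String) :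
    (critBlock7 c label entity_text lower_text).awards = c.awards := by
  simp [critBlock7, apply_ite Crit.awards]
@[simp] theorem critBlock7_membership (c : Crit) (label entity_text lower_text : String) :
    (critBlock7 c label entity_text lower_text).membership = c.membership := by
  simp [critBlock7, apply_ite Crit.membership]
@[simp] theorem critBlock7_press (c : Crit) (label entity_text lower_text : String) :
    (critBlock7 c label entity_text lower_text).press = c.press := by
  simp [critBlock7, apply_ite Crit.press]
@[simp] theorem critBlock7_judging (c : Crit) (label entity_text lower_text : String) :
    (critBlock7 c label entity_text lower_text).judging = c.judging := by
  simp [critBlock7, apply_ite Crit.judging]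
@[simp] theorem critBlock7_contribution (c : Crit) (label entity_text lower_text : String) :
    (critBlock7 c label entity_text lower_text).contribution = c.contribution := by
  simp [critBlock7, apply_ite Crit.contribution]
@[simp] theorem critBlock7_scholarly (c : Crit) (label entity_text lower_text : String) :
    (critBlock7 c label entity_text lower_text).scholarly = c.scholarly := by
  simp [critBlock7, apply_ite Crit.scholarly]
@[simp] theorem critBlock7_critical (c : Crit) (label entity_text lower_text : String) :
    (critBlock7 c label entity_text lower_text).critical = if PySem.Str.endswith label "ORG" && (anyKw criticalRoles lower_text || anyKw companySuffixes lower_text) then c.critical ++ [entity_text] else c.critical := by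
  simp [critBlock7, apply_ite Crit.critical]
@[simp] theorem critBlock7_remuneration (c : Crit) (label entity_text lower_text : String) :
    (critBlock7 c label entity_text lower_text).remuneration = c.remuneration := by
  simp [critBlock7, apply_ite Crit.remuneration]
@[simp] theorem critBlock8_awards (c : Crit) (label entity_text lower_text : String) :
    (critBlock8 c label entity_text lower_text).awards = c.awards := by
  simp [critBlock8, apply_ite Crit.awards]
@[simp] theorem critBlock8_membership (c : Crit) (label entity_text lower_text : String) :
    (critBlock8 c label entity_text lower_text).membership = c.membership := by
  simp [critBlock8, apply_ite Crit.membership]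
@[simp] theorem critBlock8_press (c : Crit) (label entity_text lower_text : String) :
    (critBlock8 c label entity_text lower_text).press = c.press := by
  simp [critBlock8, apply_ite Crit.press]
@[simp] theorem critBlock8_judging (c : Crit) (label entity_text lower_text : String) :
    (critBlock8 c label entity_text lower_text).judging = c.judging := by
  simp [critBlock8, apply_ite Crit.judging]
@[simp] theorem critBlock8_contribution (c : Crit) (label entity_text lower_text : String) :
    (critBlock8 c label entity_text lower_text).contribution = c.contribution := by
  simp [critBlock8, apply_ite Crit.contribution]
@[simp] theorem critBlock8_scholarly (c : Crit) (label entity_text lower_text : String) :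
    (critBlock8 c label entity_text lower_text).scholarly = c.scholarly := by
  simp [critBlock8, apply_ite Crit.scholarly]
@[simp] theorem critBlock8_critical (c : Crit) (label entity_text lower_text : String) :
    (critBlock8 c label entity_text lower_text).critical = c.critical := by
  simp [critBlock8, apply_ite Crit.critical]
@[simp] theorem critBlock8_remuneration (c : Crit) (label entity_text lower_text : String) :
    (critBlock8 c label entity_text lower_text).remuneration = if anyKw remunerationKeywords lower_text then c.remuneration ++ [entity_text] else c.remuneration := by
  simp [critBlock8, apply_ite Crit.remuneration]


-- the bucket a predicate p collects over a list of entities (B's per-bucket pass)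
def bucket (p : String → String → Bool) (entities : List (List (String × String))) : List String :=
  (entities.filter (fun e => p (pvGet e "entity") (PySem.Str.lower (pvGet e "word")))).map
    (fun e => pvGet e "word")

theorem bucket_cons (p : String → String → Bool) (e : List (String × String)) (es : List (List (String × String))) :
    bucket p (e :: es) =
      (if p (pvGet e "entity") (PySem.Str.lower (pvGet e "word")) then [pvGet e "word"] else []) ++ bucket p es := by
  simp only [bucket, List.filter_cons]
  split <;> simp

-- A's fold, started from any state c, appends exactly the eight buckets
theorem foldl_critStep (es : List (List (String × String))) (c : Crit) :
    es.foldl critStep c =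
      ⟨c.awards ++ bucket (fun label t => PySem.Str.endswith label "MISC" || anyKw awardKeywords t) es,
       c.membership ++ bucket (fun label t => PySem.Str.endswith label "ORG" && anyKw orgKeywords t) es,
       c.press ++ bucket (fun _ t => anyKw pressKeywords t) es,
       c.judging ++ bucket (fun _ t => anyKw judgingKeywords t) es,
       c.contribution ++ bucket (fun _ t => anyKw contributionKeywords t) es,
       c.scholarly ++ bucket (fun _ t => anyKw scholarlyKeywords t) es,
       c.critical ++ bucket (fun label t => PySem.Str.endswith label "ORG" && (anyKw criticalRoles t || anyKw companySuffixes t)) es,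
       c.remuneration ++ bucket (fun _ t => anyKw remunerationKeywords t) es⟩ := by
  induction es generalizing c with
  | nil => simp [bucket]
  | cons e es ih =>
    simp only [List.foldl_cons, ih, bucket_cons]
    refine Crit.mk.injEq .. ▸ ?_
    refine ⟨?_, ?_, ?_, ?_, ?_, ?_, ?_, ?_⟩ <;>
      (simp only [critStep, critBlock1_awards, critBlock2_awards, critBlock3_awards,
        critBlock4_awards, critBlock5_awards, critBlock6_awards, critBlock7_awards, critBlock8_awards,
        critBlock1_membership, critBlock2_membership, critBlock3_membership, critBlock4_membership,
        critBlock5_membership, critBlock6_membership, critBlock7_membership, critBlock8_membership,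
        critBlock1_press, critBlock2_press, critBlock3_press, critBlock4_press, critBlock5_press,
        critBlock6_press, critBlock7_press, critBlock8_press,
        critBlock1_judging, critBlock2_judging, critBlock3_judging, critBlock4_judging,
        critBlock5_judging, critBlock6_judging, critBlock7_judging, critBlock8_judging,
        critBlock1_contribution, critBlock2_contribution, critBlock3_contribution, critBlock4_contribution,
        critBlock5_contribution, critBlock6_contribution, critBlock7_contribution, critBlock8_contribution,
        critBlock1_scholarly, critBlock2_scholarly, critBlock3_scholarly, critBlock4_scholarly,
        critBlock5_scholarly, critBlock6_scholarly, critBlock7_scholarly, critBlock8_scholarly,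
        critBlock1_critical, critBlock2_critical, critBlock3_critical, critBlock4_critical,
        critBlock5_critical, critBlock6_critical, critBlock7_critical, critBlock8_critical,
        critBlock1_remuneration, critBlock2_remuneration, critBlock3_remuneration, critBlock4_remuneration,
        critBlock5_remuneration, critBlock6_remuneration, critBlock7_remuneration, critBlock8_remuneration]
       split <;> simp)

-- ===== VERDICT (by name: the statement is the Claim_ definition above) =====
theorem bert_entities_to_criteria_spec : Claim_equal_bert_entities_to_criteria := by
  intro entities _
  show _ = _
  simp only [bert_entities_to_criteria, foldl_critStep]
  simp [bert_entities_to_criteria_alt, critRules, bucket]
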